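-- pv_equiv track=rewrite | github.com/zhaoc1/BioinformaticsFromCoursera | Code2_5_DeGruijnGraphFromkmers2.py | build_deGruijnGraphFromKmers
-- ===== SOURCE A (Python) =====
-- def build_deGruijnGraphFromKmers(kmers):
-- 	kmers = sorted(kmers)
-- 	''' we need to merge the prefix and suffix set in case there are single isolated edges! '''
-- 	k_1mers = [k[:-1] for k in kmers] + [k[1:] for k in kmers]
-- 	k_1mers = sorted(set(k_1mers))
--
-- 	nodes = {}
-- 	for i in range(len(k_1mers)):
-- 		nodes[i] = k_1mers[i]
-- 	invnodes = {v:k for k,v in nodes.items()}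
--
-- 	edges = {}
-- 	for pat in kmers:
-- 		prefixpat = pat[:-1]
-- 		suffixpat = pat[1:]
-- 		if invnodes[prefixpat] in edges:
-- 			edges[invnodes[prefixpat]].append(invnodes[suffixpat])
-- 		else:
-- 			edges[invnodes[prefixpat]] = [invnodes[suffixpat]]
--
-- 	adjlist = {}
-- 	temp = []
-- 	for key, vals in edges.items():
-- 		adjlist[key] = vals
-- 	return adjlist,nodes
-- ===== SOURCE B (Python) =====
-- def build_deGruijnGraphFromKmers(kmers):
-- 	ks = sorted(kmers)
-- 	labels = sorted(set([k[:-1] for k in ks] + [k[1:] for k in ks]))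
-- 	inv = {s: i for i, s in enumerate(labels)}
-- 	# distinct prefixes in first-occurrence order, then one filtering scan per prefix
-- 	seen = list(dict.fromkeys(k[:-1] for k in ks))
-- 	adjlist = {inv[p]: [inv[k[1:]] for k in ks if k[:-1] == p] for p in seen}
-- 	nodes = {i: s for i, s in enumerate(labels)}
-- 	return adjlist, nodes
-- ===== Notes on version B (the rewrite author's own statement) =====
-- stated objective: alternative
-- what changed: B abandons A's incremental edge-dict loop (per-kmer invnodes lookups with a contains/append/insert branch): it dedups the prefixes once with dict.fromkeys and builds each node's out-list in one shot by a filtering comprehension over the sorted k-mers, so the adjacency is computed group-by-group instead of edge-by-edge; nodes comes straight from enumerate(labels).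
import Mathlib
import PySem

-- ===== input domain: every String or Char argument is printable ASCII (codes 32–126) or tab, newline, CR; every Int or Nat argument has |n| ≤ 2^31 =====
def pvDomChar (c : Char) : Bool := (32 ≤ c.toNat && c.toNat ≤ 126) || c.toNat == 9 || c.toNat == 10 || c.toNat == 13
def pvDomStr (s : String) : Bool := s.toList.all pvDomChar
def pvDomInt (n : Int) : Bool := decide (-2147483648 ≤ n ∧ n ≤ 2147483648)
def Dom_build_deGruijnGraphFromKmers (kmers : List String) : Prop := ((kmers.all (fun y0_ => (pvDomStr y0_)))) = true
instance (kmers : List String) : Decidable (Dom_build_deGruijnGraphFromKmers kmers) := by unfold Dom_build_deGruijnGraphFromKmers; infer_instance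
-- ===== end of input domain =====

-- B replaces A's incremental dict-building edge loop by a grouping computation: it dedups the
-- prefixes once (first-occurrence order) and computes each node's out-list by one filtering scan
-- of the sorted k-mers; objective: alternative decomposition (no speed claim).

-- ===== PORT A =====
-- literal transliteration of A; dict lookups invnodes[...] are ported as getD _ 0: the key is
-- always present (every prefix/suffix of a kmer is in k_1mers), so getD is exact there.
def build_deGruijnGraphFromKmers (kmers0 : List String) : (List (Int × List Int)) × (List (Int × String)) :=
  let kmers := PySem.List.sorted kmers0 (fun x => x) false
  let k_1mers0 := kmers.map (fun k => PySem.Str.slice k none (some (-1))) ++ kmers.map (fun k => PySem.Str.slice k (some 1) none)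
  let k_1mers := PySem.List.sorted (PySem.Set.ofList k_1mers0) (fun x => x) false
  let nodes := (PySem.List.pyRange 0 (k_1mers.length : Int) 1).foldl
      (fun d i => d.insert i (PySem.List.pyGetD k_1mers i ""))
      (PySem.Dict.empty : PySem.Dict Int String)
  let invnodes := nodes.items.foldl (fun d p => d.insert p.2 p.1) (PySem.Dict.empty : PySem.Dict String Int)
  let edges := kmers.foldl (fun d pat =>
      let prefixpat := PySem.Str.slice pat none (some (-1))
      let suffixpat := PySem.Str.slice pat (some 1) none
      if d.contains (invnodes.getD prefixpat 0) then
        d.modify (invnodes.getD prefixpat 0) [] (fun l => l ++ [invnodes.getD suffixpat 0])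
      else
        d.insert (invnodes.getD prefixpat 0) [invnodes.getD suffixpat 0])
    (PySem.Dict.empty : PySem.Dict Int (List Int))
  let adjlist := edges.items.foldl (fun d p => d.insert p.1 p.2) (PySem.Dict.empty : PySem.Dict Int (List Int))
  (adjlist.items, nodes.items)

-- ===== PORT B =====
-- dict.fromkeys(...) (order-preserving dedup) is ported as PySem.Set.ofList; the dict
-- comprehensions become folds inserting each (key, value) pair in order.
def build_deGruijnGraphFromKmers_alt (kmers0 : List String) : (List (Int × List Int)) × (List (Int × String)) :=
  let ks := PySem.List.sorted kmers0 (fun x => x) false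
  let labels := PySem.List.sorted (PySem.Set.ofList (ks.map (fun k => PySem.Str.slice k none (some (-1))) ++ ks.map (fun k => PySem.Str.slice k (some 1) none))) (fun x => x) false
  let inv := (PySem.List.enumerate labels 0).foldl (fun d p => d.insert p.2 p.1) (PySem.Dict.empty : PySem.Dict String Int)
  let seen := PySem.Set.ofList (ks.map (fun k => PySem.Str.slice k none (some (-1))))
  let adjlist := seen.foldl (fun d p => d.insert (inv.getD p 0)
      ((ks.filter (fun k => PySem.Str.slice k none (some (-1)) == p)).map
        (fun k => inv.getD (PySem.Str.slice k (some 1) none) 0)))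
    (PySem.Dict.empty : PySem.Dict Int (List Int))
  let nodes : PySem.Dict Int String := PySem.Dict.ofList (PySem.List.enumerate labels 0)
  (adjlist.items, nodes.items)

-- ===== PRECONDITION & SPEC =====
def Spec_build_deGruijnGraphFromKmers (kmers : List String) (out : (List (Int × List Int)) × (List (Int × String))) : Prop := out = build_deGruijnGraphFromKmers_alt kmers
instance (kmers : List String) (out : (List (Int × List Int)) × (List (Int × String))) : Decidable (Spec_build_deGruijnGraphFromKmers kmers out) := by unfold Spec_build_deGruijnGraphFromKmers; infer_instance

-- ===== CLAIM (what is proved, stated in full; the proofs are below) =====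
def Claim_equal_build_deGruijnGraphFromKmers : Prop := ∀ (kmers : List String), Dom_build_deGruijnGraphFromKmers kmers → Spec_build_deGruijnGraphFromKmers kmers (build_deGruijnGraphFromKmers kmers)

-- ===== LEMMAS AND PROOFS =====

-- `for i in range(len(xs)): nodes[i] = xs[i]` enumerates xs
theorem pv_map_range_getD {α : Type} (xs : List α) (s : Int) (d : α) :
    (PySem.List.pyRange s (s + xs.length) 1).map (fun i => (i, PySem.List.pyGetD xs (i - s) d))
      = PySem.List.enumerate xs s := by
  induction xs generalizing s with
  | nil => simp [PySem.List.pyRange_one_eq_nil, PySem.List.enumerate]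
  | cons x xs ih =>
    rw [PySem.List.pyRange_one_cons (by simp only [List.length_cons]; push_cast; omega),
      PySem.List.enumerate_cons]
    simp only [List.map_cons, sub_self, PySem.List.pyGetD_zero_cons]
    refine congrArg _ ?_
    have hb : s + ((x :: xs).length : Int) = (s + 1) + (xs.length : Int) := by
      simp only [List.length_cons]; push_cast; omega
    rw [hb, ← ih (s + 1)]
    refine List.map_congr_left ?_
    intro i hi
    rcases PySem.List.mem_pyRange_one.1 hi with ⟨h1, h2⟩
    have hn1 : i - s = (((i - s).toNat : Nat) : Int) := by omega
    have hn2 : i - (s + 1) = (((i - (s + 1)).toNat : Nat) : Int) := by omega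
    have e3 : (i - s).toNat = (i - (s + 1)).toNat + 1 := by omega
    rw [hn1, hn2, PySem.List.pyGetD_natCast, PySem.List.pyGetD_natCast, e3, List.getD_cons_succ]

theorem pv_nodes_items {α : Type} (xs : List α) (d : α) :
    ((PySem.List.pyRange 0 (xs.length : Int) 1).foldl
        (fun dct i => dct.insert i (PySem.List.pyGetD xs i d))
        (PySem.Dict.empty : PySem.Dict Int α)).items = PySem.List.enumerate xs 0 := by
  rw [PySem.Dict.items_foldl_insert_fresh _ (fun i => i) (fun i => PySem.List.pyGetD xs i d) _
      (fun a _ => PySem.Dict.contains_empty a)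
      (by simpa using PySem.List.nodup_pyRange_one 0 (xs.length : Int))]
  have := pv_map_range_getD xs 0 d
  simp only [zero_add] at this
  simpa using this

theorem pv_mem_enumerate {α : Type} (xs : List α) (s : Int) (i : Nat) (h : i < xs.length) :
    (s + (i : Int), xs[i]) ∈ PySem.List.enumerate xs s := by
  induction xs generalizing s i with
  | nil => simp at h
  | cons x xs ih =>
    rw [PySem.List.enumerate_cons]
    cases i with
    | zero => simp
    | succ j =>
      have := ih (s + 1) j (by simpa using Nat.lt_of_succ_lt_succ h)
      right
      simpa [add_assoc, add_comm (1 : Int)] using this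

-- Set.ofList commutes with mapping an injective-on-the-elements function
theorem pv_foldl_add_map {α β : Type} [DecidableEq α] [DecidableEq β] (g : α → β) :
    ∀ (xs : List α) (s : List α),
    (∀ a b, (a ∈ s ∨ a ∈ xs) → (b ∈ s ∨ b ∈ xs) → g a = g b → a = b) →
    (xs.map g).foldl PySem.Set.add (s.map g) = (xs.foldl PySem.Set.add s).map g := by
  intro xs
  induction xs with
  | nil => intro s _; simp
  | cons x xs ih =>
    intro s hinj
    simp only [List.map_cons, List.foldl_cons]
    have hmem : g x ∈ s.map g ↔ x ∈ s := by
      constructor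
      · intro h
        rcases List.mem_map.1 h with ⟨a, ha, hga⟩
        exact (hinj a x (Or.inl ha) (Or.inr (List.mem_cons_self)) hga) ▸ ha
      · intro h; exact List.mem_map_of_mem h
    have hadd : PySem.Set.add (s.map g) (g x) = (PySem.Set.add s x).map g := by
      rw [PySem.Set.add_eq_ite, PySem.Set.add_eq_ite]
      by_cases h : x ∈ s
      · simp [h, hmem.2 h]
      · have hnot : g x ∉ List.map g s := fun hc => h (hmem.1 hc)
        simp [h, hnot]
    rw [hadd, ih (PySem.Set.add s x)]
    intro a b ha hb hg
    refine hinj a b ?_ ?_ hg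
    · rcases ha with ha | ha
      · rcases (PySem.Set.mem_add _ _ _).1 ha with h | h
        · exact Or.inl h
        · exact Or.inr (h ▸ List.mem_cons_self)
      · exact Or.inr (List.mem_cons_of_mem _ ha)
    · rcases hb with hb | hb
      · rcases (PySem.Set.mem_add _ _ _).1 hb with h | h
        · exact Or.inl h
        · exact Or.inr (h ▸ List.mem_cons_self)
      · exact Or.inr (List.mem_cons_of_mem _ hb)

theorem pv_ofList_map {α β : Type} [DecidableEq α] [DecidableEq β] (g : α → β) (xs : List α)
    (hinj : ∀ a ∈ xs, ∀ b ∈ xs, g a = g b → a = b) :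
    PySem.Set.ofList (xs.map g) = (PySem.Set.ofList xs).map g := by
  rw [PySem.Set.ofList_eq_foldl, PySem.Set.ofList_eq_foldl]
  have := pv_foldl_add_map g xs []
    (by intro a b ha hb; simp at ha hb; exact hinj a ha b hb)
  simpa using this

-- proof-side names for the pieces both ports build (parametric in the prefix/suffix maps)
def pvLabels (L : List String) (pre suf : String → String) : List String :=
  PySem.List.sorted (PySem.Set.ofList (L.map pre ++ L.map suf)) (fun x => x) false

def pvNodesA (L : List String) (pre suf : String → String) : PySem.Dict Int String :=
  (PySem.List.pyRange 0 ((pvLabels L pre suf).length : Int) 1).foldl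
    (fun d i => d.insert i (PySem.List.pyGetD (pvLabels L pre suf) i "")) PySem.Dict.empty

def pvInvA (L : List String) (pre suf : String → String) : PySem.Dict String Int :=
  (pvNodesA L pre suf).items.foldl (fun d p => d.insert p.2 p.1) PySem.Dict.empty

def pvInvB (L : List String) (pre suf : String → String) : PySem.Dict String Int :=
  (PySem.List.enumerate (pvLabels L pre suf) 0).foldl (fun d p => d.insert p.2 p.1) PySem.Dict.empty

def pvF (L : List String) (pre suf : String → String) (s : String) : Int :=
  (pvInvA L pre suf).getD s 0

def pvEdgesA (L : List String) (pre suf : String → String) : PySem.Dict Int (List Int) :=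
  L.foldl (fun d pat =>
      if d.contains (pvF L pre suf (pre pat)) then
        d.modify (pvF L pre suf (pre pat)) [] (fun l => l ++ [pvF L pre suf (suf pat)])
      else
        d.insert (pvF L pre suf (pre pat)) [pvF L pre suf (suf pat)]) PySem.Dict.empty

def pvAdjA (L : List String) (pre suf : String → String) : PySem.Dict Int (List Int) :=
  (pvEdgesA L pre suf).items.foldl (fun d p => d.insert p.1 p.2) PySem.Dict.empty

def pvNodesB (L : List String) (pre suf : String → String) : PySem.Dict Int String :=
  PySem.Dict.ofList (PySem.List.enumerate (pvLabels L pre suf) 0)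

def pvAdjB (L : List String) (pre suf : String → String) : PySem.Dict Int (List Int) :=
  (PySem.Set.ofList (L.map pre)).foldl
    (fun d p => d.insert ((pvInvB L pre suf).getD p 0)
      ((L.filter (fun k => pre k == p)).map (fun k => (pvInvB L pre suf).getD (suf k) 0)))
    PySem.Dict.empty

theorem pv_labels_nodup (L : List String) (pre suf : String → String) :
    (pvLabels L pre suf).Nodup :=
  ((PySem.List.sorted_perm _ _ _).nodup_iff).2 (PySem.Set.nodup_ofList _)

theorem pv_pre_mem_labels (L : List String) (pre suf : String → String) {p : String} (hp : p ∈ L) :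
    pre p ∈ pvLabels L pre suf := by
  unfold pvLabels
  rw [PySem.List.mem_sorted, PySem.Set.mem_ofList]
  exact List.mem_append_left _ (List.mem_map_of_mem hp)

theorem pv_nodesA_items (L : List String) (pre suf : String → String) :
    (pvNodesA L pre suf).items = PySem.List.enumerate (pvLabels L pre suf) 0 :=
  pv_nodes_items _ _

theorem pv_invA_eq_invB (L : List String) (pre suf : String → String) :
    pvInvA L pre suf = pvInvB L pre suf := by
  unfold pvInvA pvInvB
  rw [pv_nodesA_items]

theorem pv_invB_items (L : List String) (pre suf : String → String) :
    (pvInvB L pre suf).items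
      = (PySem.List.enumerate (pvLabels L pre suf) 0).map (fun p => (p.2, p.1)) := by
  unfold pvInvB
  have h := PySem.Dict.items_foldl_insert_fresh (PySem.List.enumerate (pvLabels L pre suf) 0)
    (fun p => p.2) (fun p => p.1) PySem.Dict.empty
    (fun a _ => PySem.Dict.contains_empty _)
    (by rw [PySem.List.map_snd_enumerate]; exact pv_labels_nodup L pre suf)
  simpa [PySem.Dict.empty] using h

theorem pv_invB_keys (L : List String) (pre suf : String → String) :
    (pvInvB L pre suf).keys = pvLabels L pre suf := by
  simp only [PySem.Dict.keys, pv_invB_items, List.map_map]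
  exact PySem.List.map_snd_enumerate (pvLabels L pre suf) 0

theorem pv_f_get (L : List String) (pre suf : String → String) (i : Nat)
    (h : i < (pvLabels L pre suf).length) :
    pvF L pre suf ((pvLabels L pre suf)[i]) = (i : Int) := by
  unfold pvF
  rw [pv_invA_eq_invB]
  have hmem : (((pvLabels L pre suf)[i], (i : Int))) ∈ (pvInvB L pre suf).items := by
    rw [pv_invB_items]
    have := pv_mem_enumerate (pvLabels L pre suf) 0 i h
    simpa using List.mem_map_of_mem (f := fun p => (p.2, p.1)) this
  exact PySem.Dict.getD_of_mem_items _ hmem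
    (by rw [pv_invB_keys]; exact pv_labels_nodup L pre suf) 0

theorem pv_f_inj (L : List String) (pre suf : String → String) {a b : String}
    (ha : a ∈ pvLabels L pre suf) (hb : b ∈ pvLabels L pre suf)
    (h : pvF L pre suf a = pvF L pre suf b) : a = b := by
  rcases List.getElem_of_mem ha with ⟨i, hi, rfl⟩
  rcases List.getElem_of_mem hb with ⟨j, hj, rfl⟩
  rw [pv_f_get L pre suf i hi, pv_f_get L pre suf j hj] at h
  have : i = j := by exact_mod_cast h
  subst this
  rfl

-- A's contains/append/insert branch IS Dict.modify
theorem pv_edgesA_eq_modify (L : List String) (pre suf : String → String) :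
    pvEdgesA L pre suf
      = (L.map (fun pat => (pvF L pre suf (pre pat), pvF L pre suf (suf pat)))).foldl
          (fun d p => d.modify p.1 [] (fun l => l ++ [p.2])) PySem.Dict.empty := by
  unfold pvEdgesA
  rw [List.foldl_map]
  refine PySem.List.foldl_congr_mem L _ _ _ ?_
  intro acc pat _
  by_cases h : acc.contains (pvF L pre suf (pre pat))
  · rw [if_pos h]
  · rw [if_neg (by simp [h]), PySem.Dict.modify,
      PySem.Dict.getD_of_not_contains _ _ (by simpa using h)]
    simp

theorem pv_edgesA_keys (L : List String) (pre suf : String → String) :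
    (pvEdgesA L pre suf).keys
      = PySem.Set.ofList (L.map (fun pat => pvF L pre suf (pre pat))) := by
  rw [pv_edgesA_eq_modify]
  have h := PySem.Dict.keys_foldl_modify_key
    (L.map (fun pat => (pvF L pre suf (pre pat), pvF L pre suf (suf pat))))
    (fun p => p.1) [] (fun _ p => fun l => l ++ [p.2]) PySem.Dict.empty
  simp only [List.map_map] at h
  rw [h]
  have : (PySem.Dict.empty : PySem.Dict Int (List Int)).keys = [] := rfl
  rw [this, PySem.Set.update_nil_left]
  rfl

theorem pv_edgesA_keys_nodup (L : List String) (pre suf : String → String) :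
    (pvEdgesA L pre suf).keys.Nodup := by
  rw [pv_edgesA_keys]; exact PySem.Set.nodup_ofList _

theorem pv_edgesA_getD (L : List String) (pre suf : String → String) (c : Int) :
    (pvEdgesA L pre suf).getD c []
      = ((L.map (fun pat => (pvF L pre suf (pre pat), pvF L pre suf (suf pat)))).filter
          (fun p => p.1 == c)).map (fun p => p.2) := by
  rw [pv_edgesA_eq_modify]
  have h := PySem.Dict.getD_foldl_modify_append
    (L.map (fun pat => (pvF L pre suf (pre pat), pvF L pre suf (suf pat))))
    PySem.Dict.empty c
  simpa [PySem.Dict.getD_empty] using h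

theorem pv_edgesA_items (L : List String) (pre suf : String → String) :
    (pvEdgesA L pre suf).items
      = (PySem.Set.ofList (L.map (fun pat => pvF L pre suf (pre pat)))).map
          (fun c => (c, ((L.map (fun pat => (pvF L pre suf (pre pat), pvF L pre suf (suf pat)))).filter
            (fun p => p.1 == c)).map (fun p => p.2))) := by
  rw [PySem.Dict.items_eq_map_keys _ (pv_edgesA_keys_nodup L pre suf) [], pv_edgesA_keys]
  exact List.map_congr_left (fun c _ => by rw [pv_edgesA_getD])

theorem pv_adjA_items (L : List String) (pre suf : String → String) :
    (pvAdjA L pre suf).items = (pvEdgesA L pre suf).items := by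
  unfold pvAdjA
  have h := PySem.Dict.items_foldl_insert_fresh (pvEdgesA L pre suf).items
    (fun p => p.1) (fun p => p.2) PySem.Dict.empty
    (fun a _ => PySem.Dict.contains_empty _)
    (pv_edgesA_keys_nodup L pre suf)
  simpa using h

theorem pv_adjB_items (L : List String) (pre suf : String → String) :
    (pvAdjB L pre suf).items
      = (PySem.Set.ofList (L.map pre)).map
          (fun p => (pvF L pre suf p,
            (L.filter (fun k => pre k == p)).map (fun k => pvF L pre suf (suf k)))) := by
  unfold pvAdjB
  rw [← pv_invA_eq_invB]
  have hnd : ((PySem.Set.ofList (L.map pre)).map (fun p => pvF L pre suf p)).Nodup := by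
    refine List.Nodup.map_on ?_ (PySem.Set.nodup_ofList _)
    intro a ha b hb hab
    rw [PySem.Set.mem_ofList] at ha hb
    rcases List.mem_map.1 ha with ⟨x, hx, rfl⟩
    rcases List.mem_map.1 hb with ⟨y, hy, rfl⟩
    exact pv_f_inj L pre suf (pv_pre_mem_labels L pre suf hx) (pv_pre_mem_labels L pre suf hy) hab
  have h := PySem.Dict.items_foldl_insert_fresh (PySem.Set.ofList (L.map pre))
    (fun p => pvF L pre suf p)
    (fun p => (L.filter (fun k => pre k == p)).map (fun k => pvF L pre suf (suf k)))
    PySem.Dict.empty (fun a _ => PySem.Dict.contains_empty _) hnd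
  simpa [pvF] using h

theorem pv_adj_eq (L : List String) (pre suf : String → String) :
    (pvAdjA L pre suf).items = (pvAdjB L pre suf).items := by
  rw [pv_adjA_items, pv_edgesA_items, pv_adjB_items]
  have hpre : L.map (fun pat => pvF L pre suf (pre pat)) = (L.map pre).map (pvF L pre suf) := by
    rw [List.map_map]; rfl
  have hinj : ∀ a ∈ L.map pre, ∀ b ∈ L.map pre,
      pvF L pre suf a = pvF L pre suf b → a = b := by
    intro a ha b hb hab
    rcases List.mem_map.1 ha with ⟨x, hx, rfl⟩
    rcases List.mem_map.1 hb with ⟨y, hy, rfl⟩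
    exact pv_f_inj L pre suf (pv_pre_mem_labels L pre suf hx) (pv_pre_mem_labels L pre suf hy) hab
  rw [hpre, pv_ofList_map _ _ hinj, List.map_map]
  refine List.map_congr_left ?_
  intro p hp
  have hpL : p ∈ L.map pre := (PySem.Set.mem_ofList _ _).1 hp
  have hpLab : p ∈ pvLabels L pre suf := by
    rcases List.mem_map.1 hpL with ⟨x, hx, rfl⟩
    exact pv_pre_mem_labels L pre suf hx
  simp only [Function.comp]
  refine congrArg (Prod.mk (pvF L pre suf p)) ?_
  have hm : L.map (fun pat => (pvF L pre suf (pre pat), pvF L pre suf (suf pat)))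
      = L.map ((fun q : String × String => (pvF L pre suf q.1, pvF L pre suf q.2))
          ∘ (fun pat => (pre pat, suf pat))) :=
    List.map_congr_left (fun _ _ => rfl)
  rw [hm, ← List.map_map, List.filter_map, List.map_map]
  have hfil : List.filter ((fun q : Int × Int => q.1 == pvF L pre suf p) ∘
        (fun q : String × String => (pvF L pre suf q.1, pvF L pre suf q.2)))
        (L.map (fun pat => (pre pat, suf pat)))
      = List.filter (fun q : String × String => q.1 == p) (L.map (fun pat => (pre pat, suf pat))) := by
    refine List.filter_congr ?_
    intro q hq
    have hq1 : q.1 ∈ pvLabels L pre suf := by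
      rcases List.mem_map.1 hq with ⟨x, hx, rfl⟩
      exact pv_pre_mem_labels L pre suf hx
    by_cases h : q.1 = p
    · simp [Function.comp, h]
    · have : pvF L pre suf q.1 ≠ pvF L pre suf p :=
        fun hc => h (pv_f_inj L pre suf hq1 hpLab hc)
      simp [Function.comp, h, this]
  rw [hfil]
  have hfm : List.filter (fun q : String × String => q.1 == p) (L.map (fun pat => (pre pat, suf pat)))
      = (L.filter (fun k => pre k == p)).map (fun pat => (pre pat, suf pat)) := by
    rw [List.filter_map]
    refine congrArg _ (List.filter_congr ?_)
    intro k _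
    rfl
  rw [hfm, List.map_map]
  refine congrArg _ (List.filter_congr ?_)
  intro k _
  simp

theorem pv_nodes_eq (L : List String) (pre suf : String → String) :
    (pvNodesA L pre suf).items = (pvNodesB L pre suf).items := by
  rw [pv_nodesA_items]
  unfold pvNodesB PySem.Dict.ofList
  have h := PySem.Dict.items_foldl_insert_fresh (PySem.List.enumerate (pvLabels L pre suf) 0)
    (fun p => p.1) (fun p => p.2) PySem.Dict.empty
    (fun a _ => PySem.Dict.contains_empty _)
    (by rw [PySem.List.map_fst_enumerate]; exact PySem.List.nodup_pyRange_one 0 _)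
  have h2 : (PySem.Dict.empty.update (PySem.List.enumerate (pvLabels L pre suf) 0)).items
      = (PySem.List.enumerate (pvLabels L pre suf) 0) := by
    rw [PySem.Dict.update]
    simpa using h
  rw [h2]

theorem pv_main (ks : List String) :
    build_deGruijnGraphFromKmers ks = build_deGruijnGraphFromKmers_alt ks := by
  unfold build_deGruijnGraphFromKmers build_deGruijnGraphFromKmers_alt
  exact congrArg₂ Prod.mk
    (pv_adj_eq (PySem.List.sorted ks (fun x => x) false)
      (fun k => PySem.Str.slice k none (some (-1))) (fun k => PySem.Str.slice k (some 1) none))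
    (pv_nodes_eq (PySem.List.sorted ks (fun x => x) false)
      (fun k => PySem.Str.slice k none (some (-1))) (fun k => PySem.Str.slice k (some 1) none))

-- ===== VERDICT (by name: the statement is the Claim_ definition above) =====
theorem build_deGruijnGraphFromKmers_spec : Claim_equal_build_deGruijnGraphFromKmers := by
  intro kmers _
  unfold Spec_build_deGruijnGraphFromKmers
  exact pv_main kmers
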